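-- pv_equiv track=rewrite | github.com/terrydlek/Algorithm | 5430(백준_AC).py | transli
-- ===== SOURCE A (Python) =====
-- def transli(numli):
--     string = ''
--     li = []
--     for i in numli:
--         if i.isdigit():
--             string += i
--         else:
--             if string:
--                 li.append(string)
--                 string = ''
--     if string:
--         li.append(string)
--     return li
-- ===== SOURCE B (Python) =====
-- def transli(numli):
--     # Group consecutive elements by digit-ness with a two-pointer scan,
--     # then keep and join only the digit runs.
--     out = []
--     i, n = 0, len(numli)
--     while i < n:
--         k = numli[i].isdigit()
--         j = i
--         while j < n and numli[j].isdigit() == k: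
--             j += 1
--         if k:
--             out.append(''.join(numli[i:j]))
--         i = j
--     return out
-- ===== Notes on version B (the rewrite author's own statement) =====
-- stated objective: alternative
-- what changed: Replaces A's running string-buffer state machine (accumulate digit pieces, flush on each non-digit boundary and once at the end) with a group-then-filter scan: a two-pointer loop finds each maximal run of equal digit-ness and joins only the digit runs.
import Mathlib
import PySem

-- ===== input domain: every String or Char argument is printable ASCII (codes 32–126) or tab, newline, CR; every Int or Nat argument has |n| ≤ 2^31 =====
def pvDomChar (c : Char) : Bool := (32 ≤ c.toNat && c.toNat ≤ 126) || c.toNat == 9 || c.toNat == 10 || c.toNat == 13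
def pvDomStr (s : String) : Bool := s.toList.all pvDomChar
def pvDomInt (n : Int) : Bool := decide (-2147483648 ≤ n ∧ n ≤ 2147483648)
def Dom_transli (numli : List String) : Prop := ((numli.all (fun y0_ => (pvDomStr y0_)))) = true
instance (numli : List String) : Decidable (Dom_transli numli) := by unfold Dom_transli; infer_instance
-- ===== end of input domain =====

-- B replaces A's running-buffer/flush-on-boundary state machine by a group-then-filter
-- two-pointer scan over maximal runs of equal digit-ness (alternative decomposition, same cost).

-- ===== PORT A =====
-- A: fold over the list carrying (string, li); flush the buffer on a non-digit element and at the end.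
def transli (numli : List String) : List String :=
  let st := numli.foldl
    (fun (p : String × List String) i =>
      if PySem.Str.strIsdigit i then (p.1 ++ i, p.2)
      else if p.1 ≠ "" then ("", p.2 ++ [p.1]) else p)
    ("", [])
  if st.1 ≠ "" then st.2 ++ [st.1] else st.2

-- ===== PORT B =====
-- inner `while j < n and numli[j].isdigit() == k: j += 1` — splits off the maximal run with digit-ness k
def spanRun (k : Bool) : List String → List String × List String
  | [] => ([], [])
  | x :: xs =>
    if PySem.Str.strIsdigit x = k then
      let p := spanRun k xs
      (x :: p.1, p.2)
    else ([], x :: xs)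

theorem spanRun_rest_len (k : Bool) (xs : List String) :
    (spanRun k xs).2.length ≤ xs.length := by
  induction xs with
  | nil => simp [spanRun]
  | cons x t ih =>
    by_cases h : PySem.Str.strIsdigit x = k <;>
      simp only [spanRun, PySem.Str.strIsdigit] at h ⊢ <;> simp [h] <;> omega

-- outer `while i < n` loop of B: take the next run, keep it iff it is a digit run
def transliGo (xs : List String) : List String :=
  match hxs : xs with
  | [] => []
  | x :: t =>
    let k := PySem.Str.strIsdigit x
    let p := spanRun k t
    if k then PySem.Str.join "" (x :: p.1) :: transliGo p.2 else transliGo p.2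
termination_by xs.length
decreasing_by all_goals
  simp only [hxs, List.length_cons]
  exact Nat.lt_succ_of_le (spanRun_rest_len _ t)

def transli_alt (numli : List String) : List String := transliGo numli

-- ===== PRECONDITION & SPEC =====
def Spec_transli (numli : List String) (out : List String) : Prop := out = transli_alt numli
instance (numli : List String) (out : List String) : Decidable (Spec_transli numli out) := by unfold Spec_transli; infer_instance

-- ===== CLAIM (what is proved, stated in full; the proofs are below) =====
def Claim_equal_transli : Prop := ∀ (numli : List String), Dom_transli numli → Spec_transli numli (transli numli)

-- ===== LEMMAS AND PROOFS =====

-- common reference function: result of the grouping with pending buffer s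
def specF (s : String) : List String → List String
  | [] => if s ≠ "" then [s] else []
  | x :: xs => if PySem.Str.strIsdigit x then specF (s ++ x) xs
               else (if s ≠ "" then [s] else []) ++ specF "" xs

theorem digit_ne_empty {x : String} (h : PySem.Str.strIsdigit x = true) : x ≠ "" := by
  intro he; subst he
  simp [PySem.Str.strIsdigit, PySem.Chars.strIsdigit] at h

theorem append_ne_empty {s x : String} (h : s ≠ "") : s ++ x ≠ "" := by
  intro he
  apply h
  have : (s ++ x).toList = [] := by simp [he]
  simp at this
  cases s with | _ l => simp_all

theorem ins_nil (l : List (List Char)) :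
    (List.intersperse ([] : List Char) l).flatten = l.flatten := by
  induction l with
  | nil => simp
  | cons a t ih => cases t <;> simp_all [List.intersperse]

theorem join_cons (x : String) (r : List String) :
    PySem.Str.join "" (x :: r) = x ++ PySem.Str.join "" r := by
  simp [PySem.Str.join, PySem.Chars.join, List.intercalate, ins_nil]

theorem join_nil' : PySem.Str.join "" ([] : List String) = "" := by
  simp [PySem.Str.join, PySem.Chars.join, List.intercalate]

-- A's loop equals specF
theorem transli_loop (xs : List String) : ∀ (s : String) (li : List String),
    (let st := xs.foldl
        (fun (p : String × List String) i =>
          if PySem.Str.strIsdigit i then (p.1 ++ i, p.2)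
          else if p.1 ≠ "" then ("", p.2 ++ [p.1]) else p)
        (s, li)
     if st.1 ≠ "" then st.2 ++ [st.1] else st.2) = li ++ specF s xs := by
  induction xs with
  | nil =>
    intro s li
    by_cases h : s = "" <;> simp [specF, h]
  | cons x t ih =>
    intro s li
    by_cases hd : PySem.Str.strIsdigit x
    · simp only [List.foldl_cons, hd, if_pos, specF, ite_true]
      exact ih (s ++ x) li
    · by_cases hs : s = ""
      · simp only [List.foldl_cons, hd, hs, specF, Bool.false_eq_true, if_false, ne_eq,
          not_true_eq_false, ite_false, ite_self, List.nil_append]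
        exact ih "" li
      · simp only [List.foldl_cons, hd, specF, Bool.false_eq_true, if_false, ne_eq, hs,
          not_false_eq_true, ite_true]
        rw [ih "" (li ++ [s])]
        simp [hs]

-- pending digit buffer s: the coming digit run extends it
theorem specF_digit (xs : List String) : ∀ (s : String), s ≠ "" →
    specF s xs = (s ++ PySem.Str.join "" (spanRun true xs).1) :: specF "" (spanRun true xs).2 := by
  induction xs with
  | nil => intro s hs; simp [specF, spanRun, hs, join_nil']
  | cons x t ih =>
    intro s hs
    by_cases hd : PySem.Str.strIsdigit x
    · have hd' : PySem.Chars.strIsdigit x.toList = true := by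
        simpa [PySem.Str.strIsdigit] using hd
      rw [specF, if_pos hd, ih (s ++ x) (append_ne_empty hs)]
      simp [spanRun, PySem.Str.strIsdigit, hd', join_cons, String.append_assoc]
    · have hd' : PySem.Chars.strIsdigit x.toList = false := by
        simpa [PySem.Str.strIsdigit] using hd
      simp [specF, spanRun, PySem.Str.strIsdigit, hd', hs, join_nil']

-- skipping a non-digit run does not change the result from an empty buffer
theorem specF_skip (xs : List String) :
    specF "" xs = specF "" (spanRun false xs).2 := by
  induction xs with
  | nil => simp [spanRun]
  | cons x t ih =>
    by_cases hd : PySem.Str.strIsdigit x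
    · have hd' : PySem.Chars.strIsdigit x.toList = true := by
        simpa [PySem.Str.strIsdigit] using hd
      simp [spanRun, PySem.Str.strIsdigit, hd']
    · have hd' : PySem.Chars.strIsdigit x.toList = false := by
        simpa [PySem.Str.strIsdigit] using hd
      simp only [spanRun, PySem.Str.strIsdigit, hd', Bool.false_eq_true, if_false] at ih ⊢
      rw [specF, if_neg (by simp [PySem.Str.strIsdigit, hd']), if_neg (by simp)]
      simpa using ih

-- B's loop equals specF with empty buffer
theorem transliGo_eq (n : Nat) : ∀ (xs : List String), xs.length ≤ n →
    transliGo xs = specF "" xs := by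
  induction n with
  | zero =>
    intro xs h
    have : xs = [] := List.eq_nil_of_length_eq_zero (Nat.le_zero.mp h)
    subst this
    simp [transliGo, specF]
  | succ n ih =>
    intro xs h
    match xs with
    | [] => simp [transliGo, specF]
    | x :: t =>
      by_cases hd : PySem.Str.strIsdigit x
      · rw [transliGo]
        simp only [hd, ite_true]
        rw [ih _ (by
          have := spanRun_rest_len true t
          simp only [List.length_cons] at h; omega)]
        rw [specF, if_pos hd, show ("" ++ x : String) = x from by simp,
          specF_digit t x (digit_ne_empty hd), join_cons]
      · rw [transliGo]
        simp only [hd, Bool.false_eq_true, ite_false]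
        rw [ih _ (by
          have := spanRun_rest_len false t
          simp only [List.length_cons] at h; omega)]
        rw [specF, if_neg hd, if_neg (by simp)]
        simp only [List.nil_append]
        exact (specF_skip t).symm

-- ===== VERDICT (by name: the statement is the Claim_ definition above) =====
theorem transli_spec : Claim_equal_transli := by
  intro numli _
  unfold Spec_transli transli transli_alt
  rw [transli_loop numli "" []]
  simp only [List.nil_append]
  exact (transliGo_eq numli.length numli (le_refl _)).symm
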